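-- pv_equiv track=rewrite | github.com/mazurmartyna/prg-basics | 04-Functions/7-19.py | f
-- ===== SOURCE A (Python) =====
-- def f(number):
--     x=0
--     number = str(number)
--     count = 0
--
--     for i in range(0,10):
--         for char in number:
--             numb = int(char)
--
--             if (i == numb):
--                 count = count +1
--
--         if count >1:
--             x = x+i*count
--         count = 0
--
--     return x
-- ===== SOURCE B (Python) =====
-- def f(number):
--     counts = [0] * 10
--     for char in str(number):
--         counts[int(char)] += 1
--     return sum(d * c for d, c in enumerate(counts) if c > 1)
-- ===== Notes on version B (the rewrite author's own statement) =====
-- stated objective: idiomatic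
-- what changed: A scans the whole digit string once per candidate digit 0..9 (ten full passes); B builds a frequency table in a single pass over str(number) and then sums d*c over the ten table entries with c>1.
import Mathlib
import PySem

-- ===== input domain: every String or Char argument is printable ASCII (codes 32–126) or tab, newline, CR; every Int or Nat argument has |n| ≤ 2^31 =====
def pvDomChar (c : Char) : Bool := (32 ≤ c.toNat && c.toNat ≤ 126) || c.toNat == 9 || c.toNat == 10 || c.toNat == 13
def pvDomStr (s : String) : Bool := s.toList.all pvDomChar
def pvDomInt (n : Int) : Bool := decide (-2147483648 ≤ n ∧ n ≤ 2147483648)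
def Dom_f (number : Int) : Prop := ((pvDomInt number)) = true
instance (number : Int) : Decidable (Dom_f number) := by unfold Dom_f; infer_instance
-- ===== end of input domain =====

-- B replaces A's ten full scans of str(number) by one counting pass plus one pass over the
-- ten-entry table (idiomatic frequency-table formulation); return value only, no mutation.

-- ===== PORT A =====
-- int(char): PySem.Int.ofChars? [ch]; the `.getD 0` default is unreachable under Pre_f
-- (for number ≥ 0 every char of str(number) is a decimal digit, so int(char) returns).
def f (number : Int) : Int :=
  let s := PySem.Int.toChars number
  ((PySem.List.pyRange 0 10 1).foldl (fun (st : Int × Int) i =>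
      let count := s.foldl (fun count ch =>
        let numb := (PySem.Int.ofChars? [ch]).getD 0
        if i == numb then count + 1 else count) st.2
      let x := if count > 1 then st.1 + i * count else st.1
      (x, 0)) ((0 : Int), (0 : Int))).1

-- ===== PORT B =====
def f_alt (number : Int) : Int :=
  let counts := (PySem.Int.toChars number).foldl
    (fun counts ch =>
      let d := (PySem.Int.ofChars? [ch]).getD 0
      PySem.List.pySetD counts d (PySem.List.pyGetD counts d 0 + 1))
    (List.replicate 10 (0 : Int))
  (PySem.List.enumerate counts).foldl
    (fun acc dc => if dc.2 > 1 then acc + dc.1 * dc.2 else acc) 0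

-- ===== PRECONDITION & SPEC =====
-- A raises ValueError on negative numbers (int('-')); Pre_f excludes exactly those.
def Pre_f (number : Int) : Prop := 0 ≤ number
instance (number : Int) : Decidable (Pre_f number) := by unfold Pre_f; infer_instance
def pvWitness_f : Int := 112
def Spec_f (number : Int) (out : Int) : Prop := out = f_alt number
instance (number : Int) (out : Int) : Decidable (Spec_f number out) := by unfold Spec_f; infer_instance

-- ===== CLAIM (what is proved, stated in full; the proofs are below) =====
def Claim_equal_f : Prop := ∀ (number : Int), Dom_f number → Pre_f number → Spec_f number (f number)

-- ===== LEMMAS AND PROOFS =====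

-- the integer value Python's int(char) contributes in both ports
def pvV (c : Char) : Int := (PySem.Int.ofChars? [c]).getD 0

lemma pvAux (X : Option Nat) :
    0 ≤ (X.bind fun a => some ((a : Nat) : Int)).getD 0 := by
  cases X <;> simp

lemma pvAux2 (X : Option Nat) :
    0 ≤ (Option.map (fun n : Int => n) (X.bind fun a => some ((a : Nat) : Int))).getD 0 := by
  cases X <;> simp

lemma pvV_nonneg (c : Char) : 0 ≤ pvV c := by
  by_cases hm : c = '-'
  · subst hm; decide
  by_cases hp : c = '+'
  · subst hp; decide
  by_cases hsp : PySem.Int.isIntSpace c = true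
  · unfold pvV PySem.Int.ofChars?
    simp [hsp]
    exact pvAux _
  · unfold pvV PySem.Int.ofChars?
    simp only [List.dropWhile_cons, hsp, List.dropWhile_nil, if_false, Bool.false_eq_true,
      List.reverse_cons, List.reverse_nil, List.nil_append]
    split
    · rename_i h; injection h with h1 _; exact absurd h1 hm
    · rename_i h; injection h with h1 _; exact absurd h1 hp
    · exact pvAux2 _

-- per-digit count, as both ports produce it
def pvCnt (s : List Char) (i : Int) : Int :=
  (s.countP (fun ch => i == pvV ch) : Int)

lemma countA (s : List Char) (i n : Int) :
    s.foldl (fun count ch =>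
      let numb := (PySem.Int.ofChars? [ch]).getD 0
      if i == numb then count + 1 else count) n = n + pvCnt s i := by
  induction s generalizing n with
  | nil => simp [pvCnt]
  | cons c s ih =>
    rw [List.foldl_cons, ih]
    simp only [pvCnt, List.countP_cons, pvV]
    by_cases h : (i == (PySem.Int.ofChars? [c]).getD 0) = true <;>
      · simp only [h, if_true, if_false, Bool.false_eq_true]
        push_cast
        ring

def pvStep (counts : List Int) (ch : Char) : List Int :=
  let d := (PySem.Int.ofChars? [ch]).getD 0
  PySem.List.pySetD counts d (PySem.List.pyGetD counts d 0 + 1)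

lemma length_pvStep (L : List Int) (c : Char) : (pvStep L c).length = L.length := by
  simp [pvStep, PySem.List.length_pySetD]

lemma foldB_len (s : List Char) (L : List Int) :
    (s.foldl pvStep L).length = L.length := by
  induction s generalizing L with
  | nil => rfl
  | cons c s ih => simp [List.foldl, ih, length_pvStep]

lemma getD_pvStep (L : List Int) (c : Char) (j : Nat) (hL : L.length = 10) (hj : j < 10) :
    (pvStep L c).getD j 0 = L.getD j 0 + (if ((j : Int) == pvV c) then 1 else 0) := by
  have hv := pvV_nonneg c
  have hset : pvStep L c = L.set (pvV c).toNat (L.getD (pvV c).toNat 0 + 1) := by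
    show PySem.List.pySetD L (pvV c) (PySem.List.pyGetD L (pvV c) 0 + 1) = _
    rw [PySem.List.pySetD_of_nonneg _ _ hv, PySem.List.pyGetD_of_nonneg _ _ hv]
  rw [hset]
  by_cases hlt : (pvV c).toNat < 10
  · by_cases hje : j = (pvV c).toNat
    · subst hje
      have : ((((pvV c).toNat : Nat) : Int) == pvV c) = true := by
        simp [Int.toNat_of_nonneg hv]
      rw [this]
      simp [List.getD, hlt, hL]
    · have : (((j : Nat) : Int) == pvV c) = false := by
        simp; omega
      rw [this]
      simp [List.getD, List.getElem?_set_ne (by omega : (pvV c).toNat ≠ j)]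
  · have hnoop : L.set (pvV c).toNat (L.getD (pvV c).toNat 0 + 1) = L := by
      apply List.set_eq_of_length_le; omega
    have : (((j : Nat) : Int) == pvV c) = false := by
      simp; omega
    rw [hnoop, this]; simp

lemma foldB_getD (s : List Char) (L : List Int) (j : Nat) (hL : L.length = 10) (hj : j < 10) :
    (s.foldl pvStep L).getD j 0 = L.getD j 0 + pvCnt s (j : Int) := by
  induction s generalizing L with
  | nil => simp [pvCnt]
  | cons c s ih =>
    rw [List.foldl_cons, ih _ (by rw [length_pvStep, hL]),
      getD_pvStep L c j hL hj]
    simp only [pvCnt, List.countP_cons]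
    by_cases h : ((j : Int) == pvV c) = true
    · simp [h]; ring
    · simp [h]

-- ===== VERDICT (by name: the statement is the Claim_ definition above) =====
lemma counts_eq (s : List Char) :
    s.foldl pvStep (List.replicate 10 (0 : Int)) =
      [pvCnt s 0, pvCnt s 1, pvCnt s 2, pvCnt s 3, pvCnt s 4,
       pvCnt s 5, pvCnt s 6, pvCnt s 7, pvCnt s 8, pvCnt s 9] := by
  have hlen : (s.foldl pvStep (List.replicate 10 (0 : Int))).length = 10 := by
    rw [foldB_len]; simp
  apply List.ext_getElem (by simpa using hlen)
  intro i h1 h2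
  have hi : i < 10 := by simpa using h2
  have hget := foldB_getD s (List.replicate 10 (0 : Int)) i (by simp) hi
  rw [List.getD_eq_getElem?_getD, List.getElem?_eq_getElem h1] at hget
  rw [show (List.replicate 10 (0 : Int)).getD i 0 = 0 from by interval_cases i <;> rfl,
    zero_add] at hget
  simp only [Option.getD_some] at hget
  rw [hget]
  interval_cases i <;> norm_num

theorem f_spec : Claim_equal_f := by
  intro number _ _
  unfold Spec_f f f_alt
  rw [show (PySem.List.pyRange 0 10 1) = [0,1,2,3,4,5,6,7,8,9] from by decide]
  rw [show (fun (counts : List Int) ch =>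
      let d := (PySem.Int.ofChars? [ch]).getD 0
      PySem.List.pySetD counts d (PySem.List.pyGetD counts d 0 + 1)) = pvStep from rfl]
  rw [counts_eq]
  simp only [List.foldl, countA, PySem.List.enumerate, zero_add]
  norm_num
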